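-- pv_equiv track=rewrite | github.com/eliottcassidy2000/math | 04-computation/frobenius21_selfconverse.py | canonical_hash
-- ===== SOURCE A (Python) =====
-- def canonical_hash(A):
--     """Compute a hash that is invariant under isomorphism.
--     Uses sorted out-neighbor multiset (degree sequence, then higher-order invariants).
--     NOTE: This is NOT a complete isomorphism invariant, but a necessary condition.
--     """
--     n = len(A)
--     # Level 1: out-degrees (all same for regular tournaments)
--     out_deg = tuple(sorted(sum(row) for row in A))
--
--     # Level 2: for each vertex, count 3-cycles
--     three_cycles = []
--     for i in range(n):
--         cnt = 0
--         for j in range(n):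
--             if A[i][j] == 0:
--                 continue
--             for k in range(n):
--                 if A[j][k] == 1 and A[k][i] == 1:
--                     cnt += 1
--         three_cycles.append(cnt)
--     tc = tuple(sorted(three_cycles))
--
--     # Level 3: for each vertex, in-neighbor set structure
--     in_out = []
--     for i in range(n):
--         out_set = frozenset(j for j in range(n) if A[i][j] == 1)
--         in_set = frozenset(j for j in range(n) if A[j][i] == 1)
--         # How many edges within out-set?
--         edges_in_out = sum(1 for j in out_set for k in out_set if A[j][k] == 1)
--         in_out.append(edges_in_out)
--     io = tuple(sorted(in_out))
--
--     return (out_deg, tc, io)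
-- ===== SOURCE B (Python) =====
-- def canonical_hash(A):
--     n = len(A)
--     # Level 1: sorted out-degrees
--     out_deg = tuple(sorted(sum(row) for row in A))
--
--     # Level 2: nonzero out-lists, then a two-step-path table
--     # P[i][k] = # of j with A[i][j] != 0 and A[j][k] == 1, closed by a separate pass over k.
--     nz = [[j for j in range(n) if A[i][j] != 0] for i in range(n)]
--     P = [[sum(1 for j in nz[i] if A[j][k] == 1) for k in range(n)] for i in range(n)]
--     tc = tuple(sorted(sum(P[i][k] for k in range(n) if A[k][i] == 1)
--                       for i in range(n)))
--
--     # Level 3: build the global edge list once, then count, per vertex,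
--     # the edges whose both endpoints lie in its out-set.
--     edges = [(j, k) for j in range(n) for k in range(n) if A[j][k] == 1]
--     io = tuple(sorted(sum(1 for (j, k) in edges if A[i][j] == 1 and A[i][k] == 1)
--                       for i in range(n)))
--
--     return (out_deg, tc, io)
-- ===== Notes on version B (the rewrite author's own statement) =====
-- stated objective: alternative
-- what changed: The fused i,j,k triple loop for 3-cycle counts is replaced by precomputed nonzero out-lists feeding a two-step-path count table P[i][k] that is closed by a separate pass over k, and the per-vertex out-set edge count is replaced by building the global edge list once and counting, per vertex, the edges with both endpoints in its out-set.
import Mathlib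
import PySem

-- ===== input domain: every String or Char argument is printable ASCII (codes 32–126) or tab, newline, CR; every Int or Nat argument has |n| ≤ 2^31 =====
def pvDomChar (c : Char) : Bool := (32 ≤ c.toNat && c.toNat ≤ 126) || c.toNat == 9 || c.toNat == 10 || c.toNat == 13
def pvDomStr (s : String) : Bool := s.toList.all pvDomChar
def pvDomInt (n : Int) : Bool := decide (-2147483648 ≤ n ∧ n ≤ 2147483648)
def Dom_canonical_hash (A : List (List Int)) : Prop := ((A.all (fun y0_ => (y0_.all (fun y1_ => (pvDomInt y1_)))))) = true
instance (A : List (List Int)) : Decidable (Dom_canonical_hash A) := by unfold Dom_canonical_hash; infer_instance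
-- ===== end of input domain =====

-- B restructures the 3-cycle count through a two-step-path table with a separate closing
-- pass and the out-set edge count through a global edge list (objective: alternative
-- decomposition, same asymptotic cost); return values agree, no side effects involved.

-- ===== PORT A =====
-- A[i][j] for loop indices 0 ≤ i,j < n; exact under Pre_ (every row has length ≥ len(A))
def pvGet (A : List (List Int)) (i j : Nat) : Int := (A.getD i []).getD j 0

-- the body of A's `for i` loop of Level 2 (cnt over j,k)
def pvA_cnt (A : List (List Int)) (n i : Nat) : Int :=
  (List.range n).foldl (fun cnt j =>
    if pvGet A i j == 0 then cnt
    else (List.range n).foldl (fun cnt k =>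
      if pvGet A j k == 1 && pvGet A k i == 1 then cnt + 1 else cnt) cnt) 0

-- the body of A's `for i` loop of Level 3 (Python also builds an unused `in_set`, omitted)
def pvA_edges_in_out (A : List (List Int)) (n i : Nat) : Int :=
  let out_set := (List.range n).filter (fun j => pvGet A i j == 1)
  out_set.foldl (fun s j =>
    out_set.foldl (fun s k => if pvGet A j k == 1 then s + 1 else s) s) 0

def canonical_hash (A : List (List Int)) : List Int × List Int × List Int :=
  let n := A.length
  let out_deg := PySem.List.sorted (A.map (fun row => row.sum)) (fun x => x)
  let three_cycles := (List.range n).foldl (fun acc i => acc ++ [pvA_cnt A n i]) []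
  let tc := PySem.List.sorted three_cycles (fun x => x)
  let in_out := (List.range n).foldl (fun acc i => acc ++ [pvA_edges_in_out A n i]) []
  let io := PySem.List.sorted in_out (fun x => x)
  (out_deg, tc, io)

-- ===== PORT B =====
-- nz[i] = the list of j with A[i][j] != 0
def pvB_nz (A : List (List Int)) (n : Nat) : List (List Nat) :=
  (List.range n).map (fun i => (List.range n).filter (fun j => pvGet A i j != 0))

-- P[i][k] = number of j with A[i][j] != 0 and A[j][k] == 1
def pvB_P (A : List (List Int)) (n : Nat) : List (List Int) :=
  (List.range n).map (fun i => (List.range n).map (fun k =>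
    ((((pvB_nz A n).getD i []).filter (fun j => pvGet A j k == 1)).length : Int)))

def canonical_hash_alt (A : List (List Int)) : List Int × List Int × List Int :=
  let n := A.length
  let out_deg := PySem.List.sorted (A.map (fun row => row.sum)) (fun x => x)
  let P := pvB_P A n
  let tc := PySem.List.sorted ((List.range n).map (fun i =>
    (((List.range n).filter (fun k => pvGet A k i == 1)).map
      (fun k => (P.getD i []).getD k 0)).sum)) (fun x => x)
  let edges := (List.range n).flatMap (fun j =>
    ((List.range n).filter (fun k => pvGet A j k == 1)).map (fun k => (j, k)))
  let io := PySem.List.sorted ((List.range n).map (fun i =>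
    ((edges.filter (fun p => pvGet A i p.1 == 1 && pvGet A i p.2 == 1)).length : Int)))
    (fun x => x)
  (out_deg, tc, io)

-- ===== PRECONDITION & SPEC =====
-- Python A raises IndexError iff some row is shorter than len(A); Pre_ excludes exactly those.
def Pre_canonical_hash (A : List (List Int)) : Prop := ∀ row ∈ A, A.length ≤ row.length
instance (A : List (List Int)) : Decidable (Pre_canonical_hash A) := by unfold Pre_canonical_hash; infer_instance
def pvWitness_canonical_hash : List (List Int) := [[0, 1], [0, 0]]

def Spec_canonical_hash (A : List (List Int)) (out : List Int × List Int × List Int) : Prop := out = canonical_hash_alt A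
instance (A : List (List Int)) (out : List Int × List Int × List Int) : Decidable (Spec_canonical_hash A out) := by unfold Spec_canonical_hash; infer_instance

-- ===== CLAIM (what is proved, stated in full; the proofs are below) =====
def Claim_equal_canonical_hash : Prop := ∀ (A : List (List Int)), Dom_canonical_hash A → Pre_canonical_hash A → Spec_canonical_hash A (canonical_hash A)

-- ===== LEMMAS AND PROOFS =====

-- a List.range sum is a Finset.range sum
theorem pv_sum_range_int (n : Nat) (f : Nat → Int) :
    ((List.range n).map f).sum = ∑ x ∈ Finset.range n, f x := by
  induction n with
  | zero => simp
  | succ m ih => rw [List.range_succ, Finset.sum_range_succ]; simp [ih]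

-- a filtered List.range sum is a Finset.range sum of an if-then-else
theorem pv_sum_filter_int (n : Nat) (p : Nat → Bool) (f : Nat → Int) :
    (((List.range n).filter p).map f).sum = ∑ x ∈ Finset.range n, if p x then f x else 0 := by
  induction n with
  | zero => simp
  | succ m ih =>
    rw [List.range_succ, Finset.sum_range_succ, List.filter_append, List.map_append,
        List.sum_append, ih]
    by_cases h : p m <;> simp [h]

-- a countP over List.range, cast to Int, is a 0/1 Finset sum
theorem pv_countP_range_int (n : Nat) (p : Nat → Bool) :
    (((List.range n).countP p : Nat) : Int) = ∑ x ∈ Finset.range n, if p x then (1 : Int) else 0 := by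
  induction n with
  | zero => simp
  | succ m ih =>
    rw [List.range_succ, List.countP_append, Finset.sum_range_succ]
    by_cases h : p m <;> simp [h, ← ih]

-- pointwise equality of the Level-2 values (needs i < n for B's table lookups)
theorem pv_tc_point (A : List (List Int)) (n i : Nat) (hi : i < n) :
    pvA_cnt A n i =
      (((List.range n).filter (fun k => pvGet A k i == 1)).map
        (fun k => ((pvB_P A n).getD i []).getD k 0)).sum := by
  have hP : (((List.range n).filter (fun k => pvGet A k i == 1)).map
        (fun k => ((pvB_P A n).getD i []).getD k 0)) =
      (((List.range n).filter (fun k => pvGet A k i == 1)).map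
        (fun k => ((((List.range n).filter (fun j => pvGet A i j != 0)).filter
          (fun j => pvGet A j k == 1)).length : Int))) := by
    refine List.map_congr_left fun k hk => ?_
    have hk' : k < n := List.mem_range.mp (List.mem_of_mem_filter hk)
    rw [pvB_P, PySem.List.getD_map_range _ n i _ hi, PySem.List.getD_map_range _ n k _ hk',
        pvB_nz, PySem.List.getD_map_range _ n i _ hi]
  rw [hP, pvA_cnt]
  simp only [PySem.List.foldl_if_add_one]
  rw [PySem.List.foldl_congr_mem _ _
        (fun (cnt : Int) j => cnt + (if pvGet A i j == 0 then 0 else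
          ((List.range n).countP (fun k => pvGet A j k == 1 && pvGet A k i == 1) : Int))) _
        (by intro acc j _; by_cases h : pvGet A i j == 0 <;> simp [h]),
      PySem.List.foldl_add, zero_add, pv_sum_range_int, pv_sum_filter_int]
  calc ∑ j ∈ Finset.range n, (if pvGet A i j == 0 then 0 else
          ((List.range n).countP (fun k => pvGet A j k == 1 && pvGet A k i == 1) : Int))
      = ∑ j ∈ Finset.range n, ∑ k ∈ Finset.range n,
          (if pvGet A i j != 0 && pvGet A j k == 1 && pvGet A k i == 1 then (1:Int) else 0) := by
        refine Finset.sum_congr rfl fun j _ => ?_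
        by_cases h : pvGet A i j == 0
        · rw [if_pos h]
          refine (Finset.sum_eq_zero fun k _ => ?_).symm
          simp [bne, h]
        · rw [if_neg h, pv_countP_range_int]
          refine Finset.sum_congr rfl fun k _ => ?_
          simp [bne, h]
    _ = ∑ k ∈ Finset.range n, ∑ j ∈ Finset.range n,
          (if pvGet A i j != 0 && pvGet A j k == 1 && pvGet A k i == 1 then (1:Int) else 0) :=
        Finset.sum_comm
    _ = ∑ k ∈ Finset.range n, (if pvGet A k i == 1 then
          ((((List.range n).filter (fun j => pvGet A i j != 0)).filter
            (fun j => pvGet A j k == 1)).length : Int)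
          else 0) := by
        refine Finset.sum_congr rfl fun k _ => ?_
        by_cases h : pvGet A k i == 1
        · rw [if_pos h, ← List.countP_eq_length_filter, List.countP_filter, pv_countP_range_int]
          refine Finset.sum_congr rfl fun j _ => ?_
          by_cases h1 : pvGet A i j == 0 <;> by_cases h2 : pvGet A j k == 1 <;>
            simp [bne, h, h1, h2]
        · simp only [if_neg h]
          refine Finset.sum_eq_zero fun j _ => ?_
          simp [h]

-- pointwise equality of the Level-3 values
theorem pv_io_point (A : List (List Int)) (n i : Nat) :
    pvA_edges_in_out A n i =
      ((((List.range n).flatMap (fun j =>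
          ((List.range n).filter (fun k => pvGet A j k == 1)).map (fun k => (j, k)))).filter
        (fun p => pvGet A i p.1 == 1 && pvGet A i p.2 == 1)).length : Int) := by
  simp only [pvA_edges_in_out]
  simp only [PySem.List.foldl_if_add_one]
  rw [PySem.List.foldl_add, zero_add, List.filter_flatMap, List.length_flatMap,
      Nat.cast_list_sum, List.map_map, pv_sum_filter_int, pv_sum_range_int]
  refine Finset.sum_congr rfl fun j _ => ?_
  simp only [Function.comp_apply]
  rw [List.countP_filter, pv_countP_range_int, List.filter_map, List.length_map,
      ← List.countP_eq_length_filter, List.countP_filter, pv_countP_range_int]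
  by_cases h : pvGet A i j == 1
  · rw [if_pos h]
    refine Finset.sum_congr rfl fun k _ => ?_
    by_cases h2 : pvGet A j k == 1 <;> by_cases h3 : pvGet A i k == 1 <;>
      simp [h, h2, h3]
  · rw [if_neg h]
    refine (Finset.sum_eq_zero fun k _ => ?_).symm
    simp [h]

theorem pv_ports_eq (A : List (List Int)) : canonical_hash A = canonical_hash_alt A := by
  have h2 : (List.range A.length).map (fun i => pvA_cnt A A.length i) =
      (List.range A.length).map (fun i =>
        (((List.range A.length).filter (fun k => pvGet A k i == 1)).map
          (fun k => ((pvB_P A A.length).getD i []).getD k 0)).sum) :=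
    List.map_congr_left fun i hi => pv_tc_point A A.length i (List.mem_range.mp hi)
  have h3 : (List.range A.length).map (fun i => pvA_edges_in_out A A.length i) =
      (List.range A.length).map (fun i =>
        ((((List.range A.length).flatMap (fun j =>
            ((List.range A.length).filter (fun k => pvGet A j k == 1)).map
              (fun k => (j, k)))).filter
          (fun p => pvGet A i p.1 == 1 && pvGet A i p.2 == 1)).length : Int)) :=
    List.map_congr_left fun i _ => pv_io_point A A.length i
  simp only [canonical_hash, canonical_hash_alt,
    PySem.List.foldl_append_singleton_eq_map, List.nil_append, h2, h3]

-- ===== VERDICT (by name: the statement is the Claim_ definition above) =====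
theorem canonical_hash_spec : Claim_equal_canonical_hash := by
  intro A _ _
  unfold Spec_canonical_hash
  exact pv_ports_eq A
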